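-- pv_equiv track=rewrite | github.com/StarsExpress/LeetCode-Repository | search/triangle_validity.py | count_valid_3rd_edges
-- ===== SOURCE A (Python) =====
-- def count_valid_3rd_edges(two_edges_sum, sorted_edges: list | tuple):
--     if len(sorted_edges) <= 0:
--         return 0
--
--     back_idx, front_idx = 0, len(sorted_edges) - 1
--     while True:
--         if back_idx > front_idx:
--             return back_idx  # Implies number of 3rd edges < sum of two input edges.
--
--         mid_idx = back_idx + (front_idx - back_idx) // 2
--         if sorted_edges[mid_idx] < two_edges_sum:
--             back_idx = mid_idx + 1
--             continue
--         front_idx = mid_idx - 1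
-- ===== SOURCE B (Python) =====
-- def count_valid_3rd_edges(two_edges_sum, sorted_edges: list | tuple):
--     return sum(1 for edge in sorted_edges if edge < two_edges_sum)
-- ===== Notes on version B (the rewrite author's own statement) =====
-- stated objective: simpler
-- what changed: Replaces the hand-written binary search (two-pointer loop with midpoint arithmetic) by a one-line linear count of elements strictly below two_edges_sum, identical on the sorted inputs the function is specified for.
-- outside the precondition, e.g. on count_valid_3rd_edges(5, [10, 0]): A returns 0, B returns 1
import Mathlib
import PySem

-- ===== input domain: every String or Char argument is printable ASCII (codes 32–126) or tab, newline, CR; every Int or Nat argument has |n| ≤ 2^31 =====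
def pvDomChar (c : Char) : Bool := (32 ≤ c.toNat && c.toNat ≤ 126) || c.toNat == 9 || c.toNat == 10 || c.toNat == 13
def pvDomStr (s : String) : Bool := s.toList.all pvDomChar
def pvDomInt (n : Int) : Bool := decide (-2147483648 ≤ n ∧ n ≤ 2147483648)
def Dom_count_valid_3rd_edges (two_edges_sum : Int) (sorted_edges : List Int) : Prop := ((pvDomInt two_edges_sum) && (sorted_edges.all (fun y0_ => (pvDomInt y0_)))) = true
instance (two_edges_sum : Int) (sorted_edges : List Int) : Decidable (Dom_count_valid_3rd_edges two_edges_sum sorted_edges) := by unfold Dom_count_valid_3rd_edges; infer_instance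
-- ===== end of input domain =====

-- B replaces A's hand-written binary search by a one-line linear count of elements below
-- two_edges_sum (objective: simpler); equal on sorted input, which Pre_ requires.


-- ===== PORT A =====
-- the `while True` two-pointer loop; indices always stay in range, so the xs[mid] access
-- is ported with pyGetD (exact here: the default is never used)
def cvLoop (two_edges_sum : Int) (xs : List Int) (back_idx front_idx : Int) : Int :=
  if back_idx > front_idx then back_idx
  else
    let mid_idx := back_idx + PySem.Int.floordiv (front_idx - back_idx) 2
    if PySem.List.pyGetD xs mid_idx 0 < two_edges_sum then
      cvLoop two_edges_sum xs (mid_idx + 1) front_idx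
    else
      cvLoop two_edges_sum xs back_idx (mid_idx - 1)
termination_by (front_idx + 1 - back_idx).toNat
decreasing_by
  · have h2 : PySem.Int.floordiv (front_idx - back_idx) 2 = (front_idx - back_idx) / 2 :=
      PySem.Int.floordiv_eq_ediv_of_pos (by omega)
    simp only [h2] at *; omega
  · have h2 : PySem.Int.floordiv (front_idx - back_idx) 2 = (front_idx - back_idx) / 2 :=
      PySem.Int.floordiv_eq_ediv_of_pos (by omega)
    simp only [h2] at *; omega

def count_valid_3rd_edges (two_edges_sum : Int) (sorted_edges : List Int) : Int :=
  if (sorted_edges.length : Int) ≤ 0 then 0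
  else cvLoop two_edges_sum sorted_edges 0 ((sorted_edges.length : Int) - 1)

-- ===== PORT B =====
-- sum(1 for edge in sorted_edges if edge < two_edges_sum)
def count_valid_3rd_edges_alt (two_edges_sum : Int) (sorted_edges : List Int) : Int :=
  sorted_edges.foldl (fun acc edge => if edge < two_edges_sum then acc + 1 else acc) 0

-- ===== PRECONDITION & SPEC =====
-- Pre_ excludes lists in which some element ≥ two_edges_sum precedes an element < it
-- (the parameter is documented as sorted; on such unordered lists A's binary-search value
-- is an accident of the probe order, not the count either caller could want).
def Pre_count_valid_3rd_edges (two_edges_sum : Int) (sorted_edges : List Int) : Prop :=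
  sorted_edges.Pairwise (fun a b => b < two_edges_sum → a < two_edges_sum)
instance (two_edges_sum : Int) (sorted_edges : List Int) : Decidable (Pre_count_valid_3rd_edges two_edges_sum sorted_edges) := by unfold Pre_count_valid_3rd_edges; infer_instance

def pvWitness_count_valid_3rd_edges : Int × List Int := (4, [1, 1, 2, 5, 7])

def Spec_count_valid_3rd_edges (two_edges_sum : Int) (sorted_edges : List Int) (out : Int) : Prop := out = count_valid_3rd_edges_alt two_edges_sum sorted_edges
instance (two_edges_sum : Int) (sorted_edges : List Int) (out : Int) : Decidable (Spec_count_valid_3rd_edges two_edges_sum sorted_edges out) := by unfold Spec_count_valid_3rd_edges; infer_instance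

-- ===== CLAIM (what is proved, stated in full; the proofs are below) =====
def Claim_equal_count_valid_3rd_edges : Prop := ∀ (two_edges_sum : Int) (sorted_edges : List Int), Dom_count_valid_3rd_edges two_edges_sum sorted_edges → Pre_count_valid_3rd_edges two_edges_sum sorted_edges → Spec_count_valid_3rd_edges two_edges_sum sorted_edges (count_valid_3rd_edges two_edges_sum sorted_edges)

-- ===== LEMMAS AND PROOFS =====

-- B's fold counts the elements below the bound
theorem alt_eq_countP (s : Int) (xs : List Int) (init : Int) :
    xs.foldl (fun acc e => if e < s then acc + 1 else acc) init
      = init + (xs.countP (fun e => decide (e < s)) : Int) := by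
  induction xs generalizing init with
  | nil => simp
  | cons x xs ih =>
    simp only [List.foldl_cons, List.countP_cons, ih]
    by_cases h : x < s <;> simp [h] <;> omega

-- a list split at k by a predicate has countP = k
theorem countP_eq_of_split (p : Int → Bool) (xs : List Int) (k : Nat)
    (hk : k ≤ xs.length)
    (hlo : ∀ i (h : i < xs.length), i < k → p xs[i])
    (hhi : ∀ i (h : i < xs.length), k ≤ i → ¬ p xs[i]) :
    xs.countP p = k := by
  induction xs generalizing k with
  | nil => simp only [List.length_nil] at hk; simp only [List.countP_nil]; omega
  | cons x xs ih =>
    cases k with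
    | zero =>
      have : ∀ a ∈ x :: xs, ¬ p a := by
        intro a ha
        obtain ⟨i, h, rfl⟩ := List.mem_iff_getElem.mp ha
        exact hhi i h (Nat.zero_le i)
      simpa [List.countP_eq_zero] using this
    | succ k' =>
      have hx : p x := hlo 0 (by simp) (Nat.succ_pos k')
      rw [List.countP_cons, if_pos hx]
      have := ih k' (by simpa using hk)
        (fun i h hi => hlo (i+1) (by simpa using h) (by omega))
        (fun i h hi => hhi (i+1) (by simpa using h) (by omega))
      omega

-- the binary-search loop, on a sorted list with the stated invariant, ends at the count
theorem cvLoop_eq (s : Int) (xs : List Int) (back front : Int)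
    (hs : xs.Pairwise (fun a b => b < s → a < s))
    (hb : 0 ≤ back) (hf : front < (xs.length : Int)) (hbf : back ≤ front + 1)
    (hlo : ∀ i (h : i < xs.length), (i : Int) < back → xs[i] < s)
    (hhi : ∀ i (h : i < xs.length), front < (i : Int) → ¬ xs[i] < s) :
    cvLoop s xs back front = (xs.countP (fun e => decide (e < s)) : Int) := by
  have hpw := List.pairwise_iff_getElem.mp hs
  fun_induction cvLoop s xs back front with
  | case1 back front hgt =>
    -- back = front + 1: the split characterises the count
    have hback : back = (back.toNat : Int) := by omega
    rw [countP_eq_of_split (fun e => decide (e < s)) xs back.toNat (by omega)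
      (fun i h hi => by simpa using hlo i h (by omega))
      (fun i h hi => by simpa using hhi i h (by omega))]
    omega
  | case2 back front hgt mid hlt ih =>
    -- xs[mid] < s: everything up to mid is < s
    have hmb : back ≤ mid ∧ mid ≤ front := by
      have h2 : PySem.Int.floordiv (front - back) 2 = (front - back) / 2 :=
        PySem.Int.floordiv_eq_ediv_of_pos (by omega)
      constructor <;> simp only [mid, h2] <;> omega
    have hmidrange : mid.toNat < xs.length := by omega
    have hget : PySem.List.pyGetD xs mid 0 = xs[mid.toNat] :=
      PySem.List.pyGetD_eq_getElem _ _ (by omega) (by omega)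
    rw [hget] at hlt
    exact ih (by omega) hf (by omega)
      (fun i h hi => by
        rcases Nat.lt_or_ge i mid.toNat with hc | hc
        · exact hpw i mid.toNat h hmidrange hc hlt
        · have : i = mid.toNat := by omega
          simpa [this] using hlt)
      hhi
  | case3 back front hgt mid hge ih =>
    -- ¬ xs[mid] < s: everything from mid on fails the test
    have hmb : back ≤ mid ∧ mid ≤ front := by
      have h2 : PySem.Int.floordiv (front - back) 2 = (front - back) / 2 :=
        PySem.Int.floordiv_eq_ediv_of_pos (by omega)
      constructor <;> simp only [mid, h2] <;> omega
    have hmidrange : mid.toNat < xs.length := by omega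
    have hget : PySem.List.pyGetD xs mid 0 = xs[mid.toNat] :=
      PySem.List.pyGetD_eq_getElem _ _ (by omega) (by omega)
    rw [hget] at hge
    exact ih hb (by omega) (by omega) hlo
      (fun i h hi => by
        rcases Nat.lt_or_ge mid.toNat i with hc | hc
        · exact fun hlt => hge (hpw mid.toNat i hmidrange h hc hlt)
        · have : i = mid.toNat := by omega
          simpa [this] using hge)

-- ===== VERDICT (by name: the statement is the Claim_ definition above) =====
theorem count_valid_3rd_edges_spec : Claim_equal_count_valid_3rd_edges := by
  intro s xs _ hpre
  unfold Spec_count_valid_3rd_edges count_valid_3rd_edges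
  rw [count_valid_3rd_edges_alt, alt_eq_countP]
  split
  · rename_i h
    cases xs with
    | nil => simp
    | cons a l => simp at h; omega
  · rename_i h
    rw [cvLoop_eq s xs 0 ((xs.length : Int) - 1) hpre (by omega) (by omega) (by omega)
      (fun i hi hlt => by omega)
      (fun i hi hgt => by omega)]
    omega
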